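-- pv_equiv track=rewrite | github.com/machide-tomoyan/BMZS-calculator | Work/WS.py | colKcels4S
-- ===== SOURCE A (Python) =====
-- def colKcels4S(cels, cols_tar):
--     # - make briefly
--     colKcelsS = dict()
--     for cel in cels:
--         col_min = min(cel)
--         # skip if ...
--         if col_min not in cols_tar:     continue
--         # set
--         try:
--             colKcelsS[col_min].append(cel)
--         except KeyError:
--             colKcelsS[col_min] = [ cel ]
--     # - sort
--     colKcels4S = { col:sorted(cels, key=lambda cel: (len(cel),-sum(cel)))  for col,cels in colKcelsS.items() }
--     # - return
--     return colKcels4S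
-- ===== SOURCE B (Python) =====
-- def colKcels4S(cels, cols_tar):
--     # one pass for the key order (first occurrence of each accepted min-column),
--     # then one comprehension building each sorted bucket by filtering cels
--     keys = list(dict.fromkeys(m for m in (min(cel) for cel in cels) if m in cols_tar))
--     return {k: sorted([cel for cel in cels if min(cel) == k],
--                       key=lambda cel: (len(cel), -sum(cel)))
--             for k in keys}
-- ===== Notes on version B (the rewrite author's own statement) =====
-- stated objective: simpler
-- what changed: Replaces the incremental dict build with try/except bucket-appending by a declarative two-step: dedup the accepted min-columns for the key order, then one dict comprehension filtering-and-sorting each bucket directly from cels.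
import Mathlib
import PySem

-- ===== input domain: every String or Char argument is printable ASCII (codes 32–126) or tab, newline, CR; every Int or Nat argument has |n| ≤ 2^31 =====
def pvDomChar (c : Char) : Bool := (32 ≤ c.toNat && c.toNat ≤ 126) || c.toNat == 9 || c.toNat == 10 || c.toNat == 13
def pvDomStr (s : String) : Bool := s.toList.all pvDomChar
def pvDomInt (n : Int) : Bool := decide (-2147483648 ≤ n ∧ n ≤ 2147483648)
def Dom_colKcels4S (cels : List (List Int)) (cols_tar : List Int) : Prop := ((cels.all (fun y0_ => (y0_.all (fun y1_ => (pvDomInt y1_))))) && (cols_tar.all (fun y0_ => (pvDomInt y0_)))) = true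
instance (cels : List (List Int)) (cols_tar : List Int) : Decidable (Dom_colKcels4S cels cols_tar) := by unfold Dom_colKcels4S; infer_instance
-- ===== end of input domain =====

-- B replaces A's incremental try/except dict build by a declarative key-dedup + per-key filtered-bucket comprehension (objective: simpler).


-- ===== PORT A =====
-- min(cel) raises ValueError on an empty cel; Pre_ excludes that, the .getD 0 default is never reached inside Pre_.
def colKcels4S (cels : List (List Int)) (cols_tar : List Int) : List (Int × List (List Int)) :=
  let colKcelsS : PySem.Dict Int (List (List Int)) :=
    cels.foldl (fun d cel =>
      let col_min := (PySem.List.min? cel (fun x => x)).getD 0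
      if cols_tar.contains col_min then
        -- try append / except KeyError: set [cel]  ==  d[col_min] = d.get(col_min, []) + [cel]
        d.modify col_min [] (· ++ [cel])
      else d) PySem.Dict.empty
  colKcelsS.items.map (fun p =>
    (p.1, PySem.List.sorted2 p.2 (fun cel => (cel.length : Int)) (fun cel => -cel.sum)))

-- ===== PORT B =====
def colKcels4S_alt (cels : List (List Int)) (cols_tar : List Int) : List (Int × List (List Int)) :=
  let keys := PySem.List.dedup
    ((cels.map (fun cel => (PySem.List.min? cel (fun x => x)).getD 0)).filter (fun m => cols_tar.contains m))
  keys.map (fun k =>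
    (k, PySem.List.sorted2 (cels.filter (fun cel => (PySem.List.min? cel (fun x => x)).getD 0 == k))
          (fun cel => (cel.length : Int)) (fun cel => -cel.sum)))

-- ===== PRECONDITION & SPEC =====
-- A raises ValueError (min of empty sequence) on any empty cell; B raises there too.
def Pre_colKcels4S (cels : List (List Int)) (cols_tar : List Int) : Prop := ∀ c ∈ cels, c ≠ []
instance (cels : List (List Int)) (cols_tar : List Int) : Decidable (Pre_colKcels4S cels cols_tar) := by unfold Pre_colKcels4S; infer_instance
def pvWitness_colKcels4S : List (List Int) × List Int := ([[1, 2], [3], [2, 1]], [1, 3])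

def Spec_colKcels4S (cels : List (List Int)) (cols_tar : List Int) (out : List (Int × List (List Int))) : Prop := out = colKcels4S_alt cels cols_tar
instance (cels : List (List Int)) (cols_tar : List Int) (out : List (Int × List (List Int))) : Decidable (Spec_colKcels4S cels cols_tar out) := by unfold Spec_colKcels4S; infer_instance

-- ===== CLAIM (what is proved, stated in full; the proofs are below) =====
def Claim_equal_colKcels4S : Prop := ∀ (cels : List (List Int)) (cols_tar : List Int), Dom_colKcels4S cels cols_tar → Pre_colKcels4S cels cols_tar → Spec_colKcels4S cels cols_tar (colKcels4S cels cols_tar)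

-- ===== LEMMAS AND PROOFS =====

-- A's loop, with the 'continue' guard peeled off into a filter over the accepted cells.
theorem dict_eq_filtered (cels : List (List Int)) (cols_tar : List Int) :
    (cels.foldl (fun (d : PySem.Dict Int (List (List Int))) cel =>
        if cols_tar.contains ((PySem.List.min? cel (fun x => x)).getD 0) then
          d.modify ((PySem.List.min? cel (fun x => x)).getD 0) [] (· ++ [cel]) else d) PySem.Dict.empty)
    = (cels.filter (fun cel => cols_tar.contains ((PySem.List.min? cel (fun x => x)).getD 0))).foldl
        (fun d cel => d.modify ((PySem.List.min? cel (fun x => x)).getD 0) [] (· ++ [cel])) PySem.Dict.empty := by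
  exact PySem.List.foldl_if_eq_foldl_filter _ _ _ _

-- Each bucket of A's dict is the sub-list of cells whose min equals that key, in order.
theorem dict_getD (acc : List (List Int)) (k : Int) :
    (acc.foldl (fun (d : PySem.Dict Int (List (List Int))) cel =>
        d.modify ((PySem.List.min? cel (fun x => x)).getD 0) [] (· ++ [cel])) PySem.Dict.empty).getD k []
    = acc.filter (fun cel => (PySem.List.min? cel (fun x => x)).getD 0 == k) := by
  have hmap : ((acc.map (fun cel => (((PySem.List.min? cel (fun x => x)).getD 0 : Int), cel))).foldl
      (fun (d : PySem.Dict Int (List (List Int))) (p : Int × List Int) =>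
        d.modify p.1 [] (· ++ [p.2])) PySem.Dict.empty)
      = acc.foldl (fun (d : PySem.Dict Int (List (List Int))) cel =>
          d.modify ((PySem.List.min? cel (fun x => x)).getD 0) [] (· ++ [cel])) PySem.Dict.empty := by
    simp only [List.foldl_map]
  rw [← hmap, PySem.Dict.getD_foldl_modify_append, PySem.Dict.getD_empty, List.nil_append,
      List.filter_map, List.map_map]
  simp [Function.comp_def]

-- A's key order is the order of first occurrence of each accepted min-column.
theorem dict_keys (acc : List (List Int)) :
    (acc.foldl (fun (d : PySem.Dict Int (List (List Int))) cel =>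
        d.modify ((PySem.List.min? cel (fun x => x)).getD 0) [] (· ++ [cel])) PySem.Dict.empty).keys
    = PySem.List.dedup (acc.map (fun cel => (PySem.List.min? cel (fun x => x)).getD 0)) := by
  rw [PySem.Dict.keys_foldl_modify_key]
  simp [PySem.Dict.keys_empty, PySem.Set.update_nil_left]

theorem dict_keys_nodup (acc : List (List Int)) :
    (acc.foldl (fun (d : PySem.Dict Int (List (List Int))) cel =>
        d.modify ((PySem.List.min? cel (fun x => x)).getD 0) [] (· ++ [cel])) PySem.Dict.empty).keys.Nodup := by
  rw [dict_keys]
  exact PySem.List.nodup_dedup _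

-- ===== VERDICT =====
theorem colKcels4S_spec : Claim_equal_colKcels4S := by
  intro cels cols_tar _ _
  unfold Spec_colKcels4S colKcels4S colKcels4S_alt
  dsimp only
  rw [dict_eq_filtered]
  rw [PySem.Dict.items_eq_map_keys _ (dict_keys_nodup _) ([] : List (List Int))]
  rw [dict_keys, List.map_map]
  have hfm : (cels.map (fun cel => (PySem.List.min? cel (fun x => x)).getD 0)).filter
        (fun m => cols_tar.contains m)
      = (cels.filter (fun cel => cols_tar.contains ((PySem.List.min? cel (fun x => x)).getD 0))).map
        (fun cel => (PySem.List.min? cel (fun x => x)).getD 0) := by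
    rw [List.filter_map]; rfl
  rw [hfm]
  apply List.map_congr_left
  intro k hk
  have hkmem : k ∈ cols_tar := by
    have h1 : k ∈ (cels.filter (fun cel =>
        cols_tar.contains ((PySem.List.min? cel (fun x => x)).getD 0))).map
        (fun cel => (PySem.List.min? cel (fun x => x)).getD 0) := by
      simpa [PySem.List.dedup_eq_ofList, PySem.Set.mem_ofList] using hk
    obtain ⟨c', hc', hkc⟩ := List.mem_map.mp h1
    have h2 := List.of_mem_filter hc'
    rw [hkc] at h2
    simpa using h2
  have hbucket : ((cels.filter (fun cel => cols_tar.contains ((PySem.List.min? cel (fun x => x)).getD 0))).filter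
        (fun cel => (PySem.List.min? cel (fun x => x)).getD 0 == k))
      = cels.filter (fun cel => (PySem.List.min? cel (fun x => x)).getD 0 == k) := by
    rw [List.filter_filter]
    apply List.filter_congr
    intro c _
    by_cases h : (PySem.List.min? c (fun x => x)).getD 0 = k
    · simp [h, hkmem]
    · simp [h]
  simp only [Function.comp_apply]
  rw [dict_getD, hbucket]
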